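-- pv_equiv track=rewrite | github.com/drandyhaas/HaasoscopePro | software/utils.py | find_longest_zero_stretch
-- ===== SOURCE A (Python) =====
-- def find_longest_zero_stretch(arr, wrap):
--     if wrap: arr = arr+arr # to handle wraparounds
--     max_length = 0
--     current_length = 0
--     start_index = -1
--     current_start = -1
--     for i, num in enumerate(arr):
--         if num < 10:
--             if current_length == 0:
--                 current_start = i
--             current_length += 1
--             if current_length > max_length:
--                 max_length = current_length
--                 start_index = current_start
--         else:
--             current_length = 0
--     return start_index, max_length
-- ===== SOURCE B (Python) =====
-- def find_longest_zero_stretch(arr, wrap):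
--     if wrap: arr = arr+arr # to handle wraparounds
--     n = len(arr)
--     # positions of "large" values act as barriers; a run of small values is a gap between barriers
--     barriers = [-1] + [i for i, x in enumerate(arr) if x >= 10] + [n]
--     start, length = max(((p + 1, q - p - 1) for p, q in zip(barriers, barriers[1:])),
--                        key=lambda t: t[1])
--     return (start, length) if length > 0 else (-1, 0)
-- ===== Notes on version B (the rewrite author's own statement) =====
-- stated objective: alternative
-- what changed: B replaces A's per-element state machine (current_length/current_start counters) with a staged barrier-gap algorithm: it first collects the index list of large values (>= 10), frames it with -1 and len(arr), and then takes the first-maximal gap between consecutive barriers via zip + max(key=length).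
import Mathlib
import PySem

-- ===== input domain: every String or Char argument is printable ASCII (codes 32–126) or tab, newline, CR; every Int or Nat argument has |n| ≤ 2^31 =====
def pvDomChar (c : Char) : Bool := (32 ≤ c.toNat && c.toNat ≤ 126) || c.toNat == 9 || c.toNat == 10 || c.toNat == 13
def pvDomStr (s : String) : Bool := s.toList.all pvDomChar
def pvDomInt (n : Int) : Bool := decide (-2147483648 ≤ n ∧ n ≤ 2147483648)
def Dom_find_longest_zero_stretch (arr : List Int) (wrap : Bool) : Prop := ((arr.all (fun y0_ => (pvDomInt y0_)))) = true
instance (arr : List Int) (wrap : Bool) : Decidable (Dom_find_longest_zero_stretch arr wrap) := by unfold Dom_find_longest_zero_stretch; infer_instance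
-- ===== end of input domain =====

-- B replaces A's per-element counter state machine by a staged barrier-gap algorithm
-- (indices of large values framed by -1/len, longest gap via zip + first-maximal max); same O(n) cost.

-- ===== PORT A =====
-- A's loop body; state = (max_length, current_length, start_index, current_start)
def pvAStep (st : Int × Int × Int × Int) (p : Int × Int) : Int × Int × Int × Int :=
  match st, p with
  | (ml, cl, si, cs), (i, num) =>
    if num < 10 then
      let cs := if cl = 0 then i else cs
      let cl := cl + 1
      if cl > ml then (cl, cl, cs, cs) else (ml, cl, si, cs)
    else (ml, 0, si, cs)

def find_longest_zero_stretch (arr : List Int) (wrap : Bool) : Int × Int :=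
  let arr := if wrap then arr ++ arr else arr
  let s := (PySem.List.enumerate arr 0).foldl pvAStep (0, 0, -1, -1)
  (s.2.2.1, s.1)

-- ===== PORT B =====
def find_longest_zero_stretch_alt (arr : List Int) (wrap : Bool) : Int × Int :=
  let arr := if wrap then arr ++ arr else arr
  let n : Int := arr.length
  let barriers : List Int :=
    -1 :: ((PySem.List.enumerate arr 0).filter (fun p => decide (10 ≤ p.2))).map Prod.fst ++ [n]
  let cands := (barriers.zip barriers.tail).map (fun pq => (pq.1 + 1, pq.2 - pq.1 - 1))
  match PySem.List.max? cands (fun t => t.2) with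
  | some sl => if sl.2 > 0 then sl else (-1, 0)
  | none => (-1, 0)  -- unreachable (barriers has ≥ 2 elements); totality guard only

-- ===== PRECONDITION & SPEC =====
def Spec_find_longest_zero_stretch (arr : List Int) (wrap : Bool) (out : Int × Int) : Prop := out = find_longest_zero_stretch_alt arr wrap
instance (arr : List Int) (wrap : Bool) (out : Int × Int) : Decidable (Spec_find_longest_zero_stretch arr wrap out) := by unfold Spec_find_longest_zero_stretch; infer_instance

-- ===== CLAIM =====
def Claim_equal_find_longest_zero_stretch : Prop := ∀ (arr : List Int) (wrap : Bool), Dom_find_longest_zero_stretch arr wrap → Spec_find_longest_zero_stretch arr wrap (find_longest_zero_stretch arr wrap)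

-- ===== LEMMAS AND PROOFS =====

-- candidate gaps, recursively: bc l i p = the (start, length) gap list of l, scanning from
-- index i with p the index of the last barrier seen (p ≤ i - 1)
def pvBc : List Int → Int → Int → List (Int × Int)
  | [], i, p => [(p + 1, i - p - 1)]
  | x :: xs, i, p => if x < 10 then pvBc xs (i + 1) p else (p + 1, i - p - 1) :: pvBc xs (i + 1) i

-- strict first-maximal selection step, as a fold from (-1, 0)
def pvSel (acc : Int × Int) (c : Int × Int) : Int × Int :=
  if c.2 > acc.2 then c else acc

theorem pvBc_ne_nil (l : List Int) (i p : Int) : pvBc l i p ≠ [] := by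
  induction l generalizing i p with
  | nil => simp [pvBc]
  | cons x xs ih => simp only [pvBc]; split_ifs <;> simp [ih]

theorem pvBc_nonneg (l : List Int) (i p : Int) (h : p ≤ i - 1) :
    ∀ c ∈ pvBc l i p, 0 ≤ c.2 := by
  induction l generalizing i p with
  | nil => intro c hc; simp [pvBc] at hc; subst hc; simp; omega
  | cons x xs ih =>
    intro c hc
    simp only [pvBc] at hc
    split_ifs at hc with hx
    · exact ih (i + 1) p (by omega) c hc
    · rcases List.mem_cons.mp hc with h1 | h1
      · subst h1; simp; omega
      · exact ih (i + 1) i (by omega) c h1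

-- the zip/map candidate list of B equals pvBc
theorem pvCands_eq (l : List Int) (i p : Int) :
    (((p :: ((PySem.List.enumerate l i).filter (fun q => decide (10 ≤ q.2))).map Prod.fst ++ [i + (l.length : Int)]).zip
      ((p :: ((PySem.List.enumerate l i).filter (fun q => decide (10 ≤ q.2))).map Prod.fst ++ [i + (l.length : Int)]).tail)).map
      (fun pq => (pq.1 + 1, pq.2 - pq.1 - 1))) = pvBc l i p := by
  induction l generalizing i p with
  | nil => simp [PySem.List.enumerate, pvBc]
  | cons x xs ih =>
    by_cases hx : x < 10
    · have hfx : ¬ (10 : Int) ≤ x := by omega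
      simp only [PySem.List.enumerate_cons, List.filter_cons, decide_eq_true_eq, hfx, if_false,
        pvBc, hx, if_true, List.length_cons]
      rw [show ((((xs.length + 1 : Nat)) : Int)) = (xs.length : Int) + 1 by push_cast; ring,
        show i + ((xs.length : Int) + 1) = (i + 1) + (xs.length : Int) by ring]
      exact ih (i + 1) p
    · have hfx : (10 : Int) ≤ x := by omega
      simp only [PySem.List.enumerate_cons, List.filter_cons, decide_eq_true_eq, hfx, if_true,
        List.map_cons, pvBc, hx, if_false, List.length_cons]
      rw [show ((((xs.length + 1 : Nat)) : Int)) = (xs.length : Int) + 1 by push_cast; ring,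
        show i + ((xs.length : Int) + 1) = (i + 1) + (xs.length : Int) by ring]
      simp only [List.cons_append, List.tail_cons, List.zip_cons_cons, List.map_cons]
      have := ih (i + 1) i
      simp only [List.cons_append, List.tail_cons] at this
      rw [this]

-- max? followed by the length>0 finalisation equals the pvSel fold
theorem pvMaxSel (cs : List (Int × Int)) (s m : Int) (hm : 0 ≤ m)
    (h : ∀ c ∈ cs, 0 ≤ c.2) :
    (match PySem.List.max? ((s, m) :: cs) (fun t => t.2) with
      | some sl => if sl.2 > 0 then sl else (-1, 0)
      | none => ((-1 : Int), (0 : Int)))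
      = cs.foldl pvSel (if m > 0 then (s, m) else (-1, 0)) := by
  induction cs generalizing s m with
  | nil => simp [PySem.List.max?]
  | cons c cs ih =>
    obtain ⟨c1, c2⟩ := c
    have hc : 0 ≤ c2 := h (c1, c2) (by simp)
    by_cases hlt : m < c2
    · rw [show PySem.List.max? ((s, m) :: (c1, c2) :: cs) (fun t => t.2)
          = PySem.List.max? ((c1, c2) :: cs) (fun t => t.2) from by
        simp [PySem.List.max?, hlt]]
      rw [ih c1 c2 hc (fun d hd => h d (by simp [hd])), List.foldl_cons]
      congr 1
      simp only [pvSel]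
      split_ifs <;> first | rfl | (exfalso; omega)
    · rw [show PySem.List.max? ((s, m) :: (c1, c2) :: cs) (fun t => t.2)
          = PySem.List.max? ((s, m) :: cs) (fun t => t.2) from by
        simp [PySem.List.max?, hlt]]
      rw [ih s m hm (fun d hd => h d (by simp [hd])), List.foldl_cons]
      congr 1
      simp only [pvSel]
      split_ifs <;> first | rfl | (exfalso; omega)

-- main invariant: A's fold, projected, equals the pvSel fold over the remaining gaps.
-- State: scanning l from index i with the last barrier at p; A's tuple carries the
-- partial current run (length i-p-1, start p+1) already merged into (max, start).
theorem pvMain (l : List Int) : ∀ (i p si ml cs : Int), 0 ≤ ml → p + 1 ≤ i →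
    (i - p - 1 > 0 → cs = p + 1) → (ml = 0 → si = -1) →
    (let st := (PySem.List.enumerate l i).foldl pvAStep
        (if i - p - 1 > ml then i - p - 1 else ml, i - p - 1,
         if i - p - 1 > ml then p + 1 else si, cs);
     (st.2.2.1, st.1))
      = (pvBc l i p).foldl pvSel (if ml > 0 then (si, ml) else (-1, 0)) := by
  induction l with
  | nil =>
    intro i p si ml cs hml hpi _ hsi
    simp only [PySem.List.enumerate, pvBc, List.foldl_cons, List.foldl_nil, pvSel]
    by_cases hd : i - p - 1 > ml
    · rw [if_pos hd, if_pos hd]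
      split_ifs <;> first | rfl | (exfalso; omega)
    · rw [if_neg hd, if_neg hd]
      by_cases h0 : ml = 0
      · rw [hsi h0, h0]
        split_ifs <;> simp only [Prod.mk.injEq] <;> omega
      · split_ifs <;> first | rfl | (exfalso; omega)
  | cons x xs ih =>
    intro i p si ml cs hml hpi hcs hsi
    by_cases hx : x < 10
    · -- small element: the run continues (or starts); same barrier p
      simp only [PySem.List.enumerate_cons, List.foldl_cons, pvAStep, pvBc, if_pos hx]
      have key := ih (i + 1) p si ml (p + 1) hml (by omega) (fun _ => rfl) hsi
      simp only [show (i + 1) - p - 1 = (i - p - 1) + 1 by ring] at key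
      rw [← key]
      have hst :
          (if i - p - 1 + 1 > (if i - p - 1 > ml then i - p - 1 else ml) then
            (i - p - 1 + 1, i - p - 1 + 1, (if i - p - 1 = 0 then i else cs),
              (if i - p - 1 = 0 then i else cs))
          else ((if i - p - 1 > ml then i - p - 1 else ml), i - p - 1 + 1,
              (if i - p - 1 > ml then p + 1 else si), (if i - p - 1 = 0 then i else cs)))
          = (if i - p - 1 + 1 > ml then i - p - 1 + 1 else ml, i - p - 1 + 1,
             (if i - p - 1 + 1 > ml then p + 1 else si), p + 1) := by
        by_cases h0 : i - p - 1 = 0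
        · have hip : i = p + 1 := by omega
          rw [if_pos h0, hip]
          split_ifs <;> simp only [Prod.mk.injEq] <;> omega
        · rw [if_neg h0, hcs (by omega)]
          split_ifs <;> simp only [Prod.mk.injEq] <;> omega
      rw [hst]
    · -- large element: barrier at i; the partial run of length i-p-1 is finalised
      simp only [PySem.List.enumerate_cons, List.foldl_cons, pvAStep, pvBc, if_neg hx,
        List.foldl_cons]
      have hmlA : (0 : Int) ≤ (if i - p - 1 > ml then i - p - 1 else ml) := by
        split_ifs <;> omega
      have hsiA : (if i - p - 1 > ml then i - p - 1 else ml) = 0 →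
          (if i - p - 1 > ml then p + 1 else si) = -1 := by
        split_ifs with h
        · omega
        · exact hsi
      have key := ih (i + 1) i (if i - p - 1 > ml then p + 1 else si)
        (if i - p - 1 > ml then i - p - 1 else ml) cs hmlA (by omega)
        (fun hh => absurd hh (by omega)) hsiA
      simp only [show (i + 1) - i - 1 = (0 : Int) by ring,
        if_neg (show ¬ ((0 : Int) > (if i - p - 1 > ml then i - p - 1 else ml)) by omega)] at key
      rw [key]
      congr 1
      simp only [pvSel]
      by_cases h0 : ml = 0
      · rw [hsi h0, h0]
        split_ifs <;> rfl
      · split_ifs <;> first | rfl | (exfalso; omega)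

-- ===== VERDICT =====
theorem find_longest_zero_stretch_spec : Claim_equal_find_longest_zero_stretch := by
  intro arr wrap _
  unfold Spec_find_longest_zero_stretch find_longest_zero_stretch find_longest_zero_stretch_alt
  simp only []
  set l := if wrap then arr ++ arr else arr with hl
  have hA := pvMain l 0 (-1) (-1) 0 (-1) le_rfl (by omega) (by omega) (fun _ => rfl)
  norm_num at hA
  have hC := pvCands_eq l 0 (-1)
  simp only [zero_add] at hC
  rw [hC]
  rcases hbc : pvBc l 0 (-1) with _ | ⟨⟨c1, c2⟩, cs'⟩
  · exact absurd hbc (pvBc_ne_nil l 0 (-1))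
  · have hnn : ∀ d ∈ cs', 0 ≤ d.2 := fun d hd =>
      pvBc_nonneg l 0 (-1) (by omega) d (by rw [hbc]; exact List.mem_cons_of_mem _ hd)
    have hc0 : (0 : Int) ≤ c2 :=
      pvBc_nonneg l 0 (-1) (by omega) (c1, c2) (by rw [hbc]; simp)
    rw [pvMaxSel cs' c1 c2 hc0 hnn, hA, hbc, List.foldl_cons,
      show pvSel (-1, 0) (c1, c2) = if c2 > 0 then (c1, c2) else (-1, 0) from by simp [pvSel]]
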